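-- pv_equiv track=rewrite | github.com/asharanees/Tokemizer-Project | backend/services/optimizer/token_classifier.py | _candidate_windows
-- ===== SOURCE A (Python) =====
-- from typing import Any, Dict, List, Optional, Sequence, Tuple
--
-- def _candidate_windows(
--     candidate_drop: Sequence[Tuple[int, int]],
-- ) -> List[Tuple[int, int]]:
--     if not candidate_drop:
--         return []
--     windows: List[Tuple[int, int]] = []
--     start, end = candidate_drop[0]
--     for next_start, next_end in candidate_drop[1:]:
--         if next_start - end <= 2:
--             end = next_end
--             continue
--         windows.append((start, end))
--         start, end = next_start, next_end
--     windows.append((start, end))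
--     return windows
-- ===== SOURCE B (Python) =====
-- from typing import List, Sequence, Tuple
--
-- def _candidate_windows(
--     candidate_drop: Sequence[Tuple[int, int]],
-- ) -> List[Tuple[int, int]]:
--     # Staged passes: (1) find the cut indices where the gap between consecutive
--     # windows exceeds 2, (2) slice the sequence into contiguous segments at
--     # those cuts, (3) project each segment to (first start, last end).
--     n = len(candidate_drop)
--     cuts = [i for i in range(1, n)
--             if candidate_drop[i][0] - candidate_drop[i - 1][1] > 2]
--     segments = [candidate_drop[a:b] for a, b in zip([0] + cuts, cuts + [n])]
--     return [(seg[0][0], seg[-1][1]) for seg in segments if seg]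
-- ===== Notes on version B (the rewrite author's own statement) =====
-- stated objective: alternative
-- what changed: Replaces A's single stateful pass with a running (start,end) accumulator by three staged comprehensions: compute the list of cut indices where the gap exceeds 2, slice the input into contiguous segments at those cuts via zip of bounds, then project each segment to (first start, last end).
import Mathlib
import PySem

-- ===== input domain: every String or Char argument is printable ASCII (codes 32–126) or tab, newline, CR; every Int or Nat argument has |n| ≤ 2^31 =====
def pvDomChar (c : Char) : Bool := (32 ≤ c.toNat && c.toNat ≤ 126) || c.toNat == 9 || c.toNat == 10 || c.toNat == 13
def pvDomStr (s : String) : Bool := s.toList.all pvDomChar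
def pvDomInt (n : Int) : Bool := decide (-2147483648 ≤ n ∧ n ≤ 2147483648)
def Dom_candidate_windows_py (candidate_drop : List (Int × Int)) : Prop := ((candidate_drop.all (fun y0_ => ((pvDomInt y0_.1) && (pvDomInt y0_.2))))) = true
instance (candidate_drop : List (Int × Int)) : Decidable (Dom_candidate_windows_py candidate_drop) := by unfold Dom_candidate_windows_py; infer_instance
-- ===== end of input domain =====

-- B replaces A's single stateful merge pass by three staged comprehensions
-- (cut indices, segments sliced at the cuts, projection of each segment);
-- same results, no speed claim (objective: alternative).

-- ===== PORT A =====
-- loop body of A: state = (windows, start, end)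
def pvStepA (acc : List (Int × Int) × Int × Int) (p : Int × Int) : List (Int × Int) × Int × Int :=
  if p.1 - acc.2.2 ≤ 2 then (acc.1, acc.2.1, p.2)
  else (acc.1 ++ [(acc.2.1, acc.2.2)], p.1, p.2)

def candidate_windows_py (candidate_drop : List (Int × Int)) : List (Int × Int) :=
  match candidate_drop with
  | [] => []
  | (s, e) :: rest =>
    let st := rest.foldl pvStepA ([], s, e)
    st.1 ++ [(st.2.1, st.2.2)]

-- ===== PORT B =====
-- cuts = [i for i in range(1, n) if cd[i][0] - cd[i-1][1] > 2]
-- (the indices i and i-1 are nonnegative and in range, so Python indexing is exactly getD here)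
def pvCuts (cd : List (Int × Int)) : List Nat :=
  (List.range' 1 (cd.length - 1)).filter
    (fun i => (cd.getD i (0, 0)).1 - (cd.getD (i - 1) (0, 0)).2 > 2)

-- segments = [cd[a:b] for a, b in zip([0] + cuts, cuts + [n])]
-- (0 ≤ a ≤ b ≤ n, so the Python slice cd[a:b] is exactly (cd.drop a).take (b - a))
def pvSegs (cd : List (Int × Int)) : List (List (Int × Int)) :=
  ((0 :: pvCuts cd).zip (pvCuts cd ++ [cd.length])).map
    (fun ab => (cd.drop ab.1).take (ab.2 - ab.1))

-- return [(seg[0][0], seg[-1][1]) for seg in segments if seg]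
def candidate_windows_py_alt (candidate_drop : List (Int × Int)) : List (Int × Int) :=
  ((pvSegs candidate_drop).filter (fun s => !s.isEmpty)).map
    (fun g => ((g.headD (0, 0)).1, (g.getLastD (0, 0)).2))

-- ===== PRECONDITION & SPEC =====
def Spec_candidate_windows_py (candidate_drop : List (Int × Int)) (out : List (Int × Int)) : Prop := out = candidate_windows_py_alt candidate_drop
instance (candidate_drop : List (Int × Int)) (out : List (Int × Int)) : Decidable (Spec_candidate_windows_py candidate_drop out) := by unfold Spec_candidate_windows_py; infer_instance

-- ===== CLAIM (what is proved, stated in full; the proofs are below) =====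
def Claim_equal_candidate_windows_py : Prop := ∀ (candidate_drop : List (Int × Int)), Dom_candidate_windows_py candidate_drop → Spec_candidate_windows_py candidate_drop (candidate_windows_py candidate_drop)

-- ===== LEMMAS AND PROOFS =====

-- A's fold equals pvMerge, the recursive merge from a running window (s, e)
def pvMerge (s e : Int) : List (Int × Int) → List (Int × Int)
  | [] => [(s, e)]
  | p :: rest => if p.1 - e ≤ 2 then pvMerge s p.2 rest
                 else (s, e) :: pvMerge p.1 p.2 rest

lemma pvMerge_cons (s e : Int) (p : Int × Int) (rest : List (Int × Int)) :
    pvMerge s e (p :: rest) = if p.1 - e ≤ 2 then pvMerge s p.2 rest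
                              else (s, e) :: pvMerge p.1 p.2 rest := rfl

lemma pvMerge_shape (r : List (Int × Int)) : ∀ e : Int, ∃ b t, ∀ s : Int, pvMerge s e r = (s, b) :: t := by
  induction r with
  | nil => intro e; exact ⟨e, [], fun s => rfl⟩
  | cons q r ih =>
    intro e
    by_cases h : q.1 - e ≤ 2
    · obtain ⟨b, t, hb⟩ := ih q.2
      exact ⟨b, t, fun s => by simp [pvMerge, h, hb]⟩
    · exact ⟨e, pvMerge q.1 q.2 r, fun s => by simp [pvMerge, h]⟩

lemma pvCuts_pos (cd : List (Int × Int)) : ∀ i ∈ pvCuts cd, 1 ≤ i := by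
  intro i hi
  unfold pvCuts at hi
  have := List.mem_range'_1.mp (List.mem_of_mem_filter hi)
  omega

lemma pvCuts_cons (p q : Int × Int) (rest : List (Int × Int)) :
    pvCuts (p :: q :: rest)
      = (if q.1 - p.2 > 2 then [1] else []) ++ (pvCuts (q :: rest)).map (· + 1) := by
  unfold pvCuts
  rw [show (p :: q :: rest).length - 1 = rest.length + 1 from by simp]
  rw [show (q :: rest).length - 1 = rest.length from by simp]
  rw [show List.range' 1 (rest.length + 1) = 1 :: List.range' 2 rest.length from rfl]
  rw [List.filter_cons]
  rw [show (List.range' 2 rest.length) = List.map (fun x => x + 1) (List.range' 1 rest.length) from List.range'_succ_left]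
  rw [List.filter_map]
  have htail : List.filter ((fun i => decide ((((p :: q :: rest).getD i (0,0)).1 - ((p :: q :: rest).getD (i-1) (0,0)).2) > 2)) ∘ (fun x => x + 1)) (List.range' 1 rest.length)
      = List.filter (fun i => decide ((((q :: rest).getD i (0,0)).1 - (((q :: rest)).getD (i-1) (0,0)).2) > 2)) (List.range' 1 rest.length) := by
    apply List.filter_congr
    intro i hi
    obtain ⟨h1i, _⟩ := List.mem_range'_1.mp hi
    obtain ⟨j, rfl⟩ : ∃ j, i = j + 1 := ⟨i - 1, by omega⟩
    simp [Function.comp]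
  by_cases h : q.1 - p.2 > 2
  · simp only [htail]
    rw [if_pos (by simpa using h), if_pos h]
    simp
  · simp only [htail]
    rw [if_neg (by simpa using h), if_neg h]
    simp

lemma pvSeg_shift (p : Int × Int) (cd : List (Int × Int)) (l1 l2 : List Nat) :
    ((l1.map (· + 1)).zip (l2.map (· + 1))).map
        (fun ab => ((p :: cd).drop ab.1).take (ab.2 - ab.1))
      = (l1.zip l2).map (fun ab => (cd.drop ab.1).take (ab.2 - ab.1)) := by
  rw [List.zip_map, List.map_map]
  apply List.map_congr_left
  intro ab _
  simp [Prod.map, Nat.succ_sub_succ]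

lemma pvSegs_cons_cut (p q : Int × Int) (rest : List (Int × Int)) (h : q.1 - p.2 > 2) :
    pvSegs (p :: q :: rest) = [p] :: pvSegs (q :: rest) := by
  unfold pvSegs
  rw [pvCuts_cons, if_pos h, List.singleton_append]
  rw [List.cons_append, List.zip_cons_cons, List.map_cons]
  congr 1
  rw [show (1 : Nat) :: (pvCuts (q :: rest)).map (· + 1) = ((0 :: pvCuts (q :: rest)).map (· + 1)) from by simp]
  rw [show (pvCuts (q :: rest)).map (· + 1) ++ [(p :: q :: rest).length]
        = ((pvCuts (q :: rest) ++ [(q :: rest).length]).map (· + 1)) from by simp]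
  exact pvSeg_shift p (q :: rest) _ _

lemma pvSegs_cons_nocut (p q : Int × Int) (rest : List (Int × Int)) (h : ¬ q.1 - p.2 > 2) :
    ∃ s0 tail, pvSegs (q :: rest) = s0 :: tail ∧ pvSegs (p :: q :: rest) = (p :: s0) :: tail
      ∧ s0.headD (0, 0) = q ∧ s0 ≠ [] := by
  obtain ⟨h', t', hct⟩ : ∃ h' t', pvCuts (q :: rest) ++ [(q :: rest).length] = h' :: t' := by
    cases pvCuts (q :: rest) <;> exact ⟨_, _, rfl⟩
  have hh1 : 1 ≤ h' := by
    by_cases hC : pvCuts (q :: rest) = []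
    · rw [hC] at hct
      simp at hct
      omega
    · obtain ⟨c, cs, hcc⟩ := List.exists_cons_of_ne_nil hC
      rw [hcc] at hct
      simp at hct
      exact pvCuts_pos (q :: rest) h' (by rw [hcc, ← hct.1]; exact List.mem_cons_self ..)
  obtain ⟨k, rfl⟩ : ∃ k, h' = k + 1 := ⟨h' - 1, by omega⟩
  refine ⟨(q :: rest).take (k + 1), ((pvCuts (q :: rest)).zip t').map
      (fun ab => ((q :: rest).drop ab.1).take (ab.2 - ab.1)), ?_, ?_, by simp, by simp⟩
  · unfold pvSegs
    rw [hct, List.zip_cons_cons, List.map_cons]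
    simp
  · unfold pvSegs
    rw [pvCuts_cons, if_neg h, List.nil_append]
    rw [show (pvCuts (q :: rest)).map (· + 1) ++ [(p :: q :: rest).length]
          = ((pvCuts (q :: rest) ++ [(q :: rest).length]).map (· + 1)) from by simp]
    rw [hct, List.map_cons, List.zip_cons_cons, List.map_cons]
    rw [pvSeg_shift p (q :: rest)]
    congr 1

lemma pvB_merge (rest : List (Int × Int)) : ∀ p : Int × Int,
    candidate_windows_py_alt (p :: rest) = pvMerge p.1 p.2 rest := by
  induction rest with
  | nil =>
    intro p
    rfl
  | cons q r ih =>
    intro p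
    by_cases h : q.1 - p.2 > 2
    · unfold candidate_windows_py_alt
      rw [pvSegs_cons_cut p q r h, List.filter_cons]
      rw [if_pos (show (!([p] : List (Int × Int)).isEmpty) = true from rfl), List.map_cons]
      rw [pvMerge_cons, if_neg (show ¬(q.1 - p.2 ≤ 2) from by omega)]
      rw [← ih q]
      rfl
    · obtain ⟨s0, tail, hq, hpq, hhead, hne⟩ := pvSegs_cons_nocut p q r h
      obtain ⟨b, t, hb⟩ := pvMerge_shape r q.2
      have hlast : ∀ d : Int × Int, s0.getLastD d = s0.getLastD (0, 0) := by
        intro d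
        cases s0 with
        | nil => exact absurd rfl hne
        | cons x xs => rw [List.getLastD_cons, List.getLastD_cons]
      have haq : candidate_windows_py_alt (q :: r)
          = (q.1, (s0.getLastD (0, 0)).2) :: (tail.filter (fun s => !s.isEmpty)).map
              (fun g => ((g.headD (0, 0)).1, (g.getLastD (0, 0)).2)) := by
        have hE : (!s0.isEmpty) = true := by simp [hne]
        unfold candidate_windows_py_alt
        rw [hq, List.filter_cons, if_pos hE, List.map_cons, hhead]
      have hkey := (haq.symm.trans (ih q)).trans (hb q.1)
      rw [List.cons.injEq] at hkey
      have hpm : pvMerge p.1 p.2 (q :: r) = (p.1, b) :: t := by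
        rw [pvMerge_cons, if_pos (show q.1 - p.2 ≤ 2 from by omega)]
        exact hb p.1
      have h2 : (s0.getLastD (0, 0)).2 = b := by
        have := hkey.1
        simp only [Prod.mk.injEq] at this
        exact this.2
      have h1 : ((p :: s0).getLastD (0, 0)).2 = b := by
        rw [List.getLastD_cons, hlast p, h2]
      unfold candidate_windows_py_alt
      rw [hpq, List.filter_cons]
      rw [if_pos (show (!((p :: s0) : List (Int × Int)).isEmpty) = true from rfl), List.map_cons]
      rw [hpm, List.cons.injEq]
      exact ⟨by rw [Prod.mk.injEq]; exact ⟨rfl, h1⟩, hkey.2⟩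
lemma pvA_inv (rest : List (Int × Int)) : ∀ (ws : List (Int × Int)) (s e : Int),
    (rest.foldl pvStepA (ws, s, e)).1 ++ [((rest.foldl pvStepA (ws, s, e)).2.1, (rest.foldl pvStepA (ws, s, e)).2.2)]
      = ws ++ pvMerge s e rest := by
  induction rest with
  | nil => intro ws s e; simp [pvMerge]
  | cons p rest ih =>
    intro ws s e
    simp only [List.foldl_cons, pvStepA, pvMerge]
    by_cases h : p.1 - e ≤ 2
    · simp [h, ih]
    · simp [h, ih, List.append_assoc]

-- ===== VERDICT (by name: the statement is the Claim_ definition above) =====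
theorem candidate_windows_py_spec : Claim_equal_candidate_windows_py := by
  intro cd _
  unfold Spec_candidate_windows_py
  match cd with
  | [] => rfl
  | (s, e) :: rest =>
    have hA := pvA_inv rest [] s e
    simp only [List.nil_append] at hA
    show candidate_windows_py ((s, e) :: rest) = _
    rw [pvB_merge rest (s, e)]
    unfold candidate_windows_py
    exact hA
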